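-- pv_equiv track=rewrite | github.com/balewgize/google-indexing | submit_urls.py | prepare_urls_for_submission
-- ===== SOURCE A (Python) =====
-- def prepare_urls_for_submission(urls_to_be_submitted, submitted_urls):
--     """Preare batch of 100 URLs to be submittted."""
--     all_batches = []
--     one_batch = []  # a list 100 URLs to be submitted using one key
--     for url in urls_to_be_submitted:
--         if url not in submitted_urls:
--             one_batch.append(url)
--
--         if len(one_batch) == 100:
--             all_batches.append(one_batch)
--             one_batch = []
--
--     if one_batch:
--         all_batches.append(one_batch)  # if there are URLs less than hundred at the end
--     return all_batches
-- ===== SOURCE B (Python) =====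
-- def prepare_urls_for_submission(urls_to_be_submitted, submitted_urls):
--     """Prepare batches of 100 URLs to be submitted."""
--     filtered = [url for url in urls_to_be_submitted if url not in submitted_urls]
--     return [filtered[i:i + 100] for i in range(0, len(filtered), 100)]
-- ===== Notes on version B (the rewrite author's own statement) =====
-- stated objective: simpler
-- what changed: Replaces A's interleaved filter-and-count loop (appending one element at a time and resetting a batch at 100) with two plain passes: a filter comprehension, then index-stride slicing into chunks of 100.
import Mathlib
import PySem

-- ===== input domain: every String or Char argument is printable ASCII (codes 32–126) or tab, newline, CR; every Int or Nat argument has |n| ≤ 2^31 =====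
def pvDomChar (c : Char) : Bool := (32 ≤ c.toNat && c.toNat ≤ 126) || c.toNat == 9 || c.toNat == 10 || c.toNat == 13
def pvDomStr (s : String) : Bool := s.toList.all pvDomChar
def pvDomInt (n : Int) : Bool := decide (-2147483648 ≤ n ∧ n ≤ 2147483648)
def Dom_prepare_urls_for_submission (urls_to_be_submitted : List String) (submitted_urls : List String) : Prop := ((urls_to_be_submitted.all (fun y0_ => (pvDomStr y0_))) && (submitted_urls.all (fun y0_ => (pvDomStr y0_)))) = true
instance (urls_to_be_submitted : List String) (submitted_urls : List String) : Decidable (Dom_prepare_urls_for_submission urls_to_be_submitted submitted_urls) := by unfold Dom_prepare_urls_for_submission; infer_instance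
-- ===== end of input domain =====

-- B splits A's interleaved filter-and-count loop into two plain passes (filter, then
-- index-stride slicing into chunks of 100); same results, simpler decomposition.


-- ===== PORT A =====
-- one loop step of A: maybe-append to the current batch, flush it when it reaches 100
def pvStepA (submitted_urls : List String) (st : List (List String) × List String) (url : String) : List (List String) × List String :=
  let one_batch := if url ∉ submitted_urls then st.2 ++ [url] else st.2
  if one_batch.length = 100 then (st.1 ++ [one_batch], []) else (st.1, one_batch)

def prepare_urls_for_submission (urls_to_be_submitted : List String) (submitted_urls : List String) : List (List String) :=
  let st := urls_to_be_submitted.foldl (pvStepA submitted_urls) ([], [])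
  if st.2.isEmpty then st.1 else st.1 ++ [st.2]

-- ===== PORT B =====
def prepare_urls_for_submission_alt (urls_to_be_submitted : List String) (submitted_urls : List String) : List (List String) :=
  let filtered := urls_to_be_submitted.filter (fun url => decide (url ∉ submitted_urls))
  (PySem.List.pyRange 0 (filtered.length : Int) 100).map
    (fun i => PySem.List.slice filtered (some i) (some (i + 100)))

-- ===== PRECONDITION & SPEC =====
def Spec_prepare_urls_for_submission (urls_to_be_submitted : List String) (submitted_urls : List String) (out : List (List String)) : Prop := out = prepare_urls_for_submission_alt urls_to_be_submitted submitted_urls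
instance (urls_to_be_submitted : List String) (submitted_urls : List String) (out : List (List String)) : Decidable (Spec_prepare_urls_for_submission urls_to_be_submitted submitted_urls out) := by unfold Spec_prepare_urls_for_submission; infer_instance

-- ===== CLAIM (what is proved, stated in full; the proofs are below) =====
def Claim_equal_prepare_urls_for_submission : Prop := ∀ (urls_to_be_submitted : List String) (submitted_urls : List String), Dom_prepare_urls_for_submission urls_to_be_submitted submitted_urls → Spec_prepare_urls_for_submission urls_to_be_submitted submitted_urls (prepare_urls_for_submission urls_to_be_submitted submitted_urls)

-- ===== LEMMAS AND PROOFS =====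

-- chunks of 100: the common shape both programs compute
def pvChunk100 (l : List String) : List (List String) :=
  if h : l = [] then [] else l.take 100 :: pvChunk100 (l.drop 100)
termination_by l.length
decreasing_by
  have := List.length_pos_of_ne_nil h
  simp; omega

-- "flush the last partial batch" tail of A
def pvFinish (st : List (List String) × List String) : List (List String) :=
  if st.2.isEmpty then st.1 else st.1 ++ [st.2]

-- the filtered-out loop step: always append, flush at 100
def pvStepF (st : List (List String) × List String) (url : String) : List (List String) × List String :=
  if (st.2 ++ [url]).length = 100 then (st.1 ++ [st.2 ++ [url]], []) else (st.1, st.2 ++ [url])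

-- A's loop over all urls = the simplified loop over the filtered urls
lemma foldA_eq_foldF (submitted : List String) :
    ∀ (urls : List String) (acc : List (List String)) (batch : List String),
      batch.length < 100 →
      urls.foldl (pvStepA submitted) (acc, batch)
        = (urls.filter (fun url => decide (url ∉ submitted))).foldl pvStepF (acc, batch) := by
  intro urls
  induction urls with
  | nil => intro acc batch h; simp
  | cons x xs ih =>
    intro acc batch h
    by_cases hx : x ∈ submitted
    · have hstep : pvStepA submitted (acc, batch) x = (acc, batch) := by
        simp [pvStepA, hx]; omega
      have hf : (x :: xs).filter (fun url => decide (url ∉ submitted))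
          = xs.filter (fun url => decide (url ∉ submitted)) := by
        simp [hx]
      rw [List.foldl_cons, hstep, hf, ih _ _ h]
    · have hstep : pvStepA submitted (acc, batch) x = pvStepF (acc, batch) x := by
        simp [pvStepA, pvStepF, hx]
      have hf : (x :: xs).filter (fun url => decide (url ∉ submitted))
          = x :: xs.filter (fun url => decide (url ∉ submitted)) := by
        simp [hx]
      rw [List.foldl_cons, hstep, hf, List.foldl_cons]
      by_cases h100 : (batch ++ [x]).length = 100
      · have hstep2 : pvStepF (acc, batch) x = (acc ++ [batch ++ [x]], []) := by
          simp only [pvStepF]; rw [if_pos h100]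
        rw [hstep2, ih _ _ (by norm_num)]
      · have hlt : (batch ++ [x]).length < 100 := by
          simp at h100 ⊢; omega
        have hstep2 : pvStepF (acc, batch) x = (acc, batch ++ [x]) := by
          simp only [pvStepF]; rw [if_neg h100]
        rw [hstep2, ih _ _ hlt]

-- the simplified loop computes 100-chunks
lemma foldF_eq_chunks :
    ∀ (l : List String) (acc : List (List String)) (batch : List String),
      batch.length < 100 →
      pvFinish (l.foldl pvStepF (acc, batch)) = acc ++ pvChunk100 (batch ++ l) := by
  intro l
  induction l with
  | nil =>
    intro acc batch h
    by_cases hb : batch = []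
    · simp [hb, pvFinish, pvChunk100]
    · rw [pvChunk100]
      simp [pvFinish, hb, List.take_of_length_le (le_of_lt h),
            List.drop_eq_nil_of_le (le_of_lt h), pvChunk100]
  | cons x xs ih =>
    intro acc batch h
    by_cases h100 : (batch ++ [x]).length = 100
    · have hstep : pvStepF (acc, batch) x = (acc ++ [batch ++ [x]], []) := by
        simp only [pvStepF]; rw [if_pos h100]
      rw [List.foldl_cons, hstep, ih _ _ (by norm_num)]
      have hsplit : batch ++ x :: xs = (batch ++ [x]) ++ xs := by simp
      rw [hsplit]
      have hne : (batch ++ [x]) ++ xs ≠ [] := by simp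
      conv_rhs => rw [pvChunk100]
      rw [dif_neg hne]
      rw [show (100 : ℕ) = (batch ++ [x]).length from h100.symm,
          List.take_left, List.drop_left]
      simp
    · have hlt : (batch ++ [x]).length < 100 := by
        simp at h100 ⊢; omega
      have hstep : pvStepF (acc, batch) x = (acc, batch ++ [x]) := by
        simp only [pvStepF]; rw [if_neg h100]
      rw [List.foldl_cons, hstep, ih _ _ hlt]
      simp

-- step-100 range unfolding lemmas (derived from PySem.List.pyRange_of_pos)
lemma pyRange100_nil (a b : Int) (h : b ≤ a) : PySem.List.pyRange a b 100 = [] := by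
  rw [PySem.List.pyRange_of_pos a b (by norm_num)]
  simp [not_lt.mpr h]

lemma pyRange100_cons (a b : Int) (h : a < b) :
    PySem.List.pyRange a b 100 = a :: PySem.List.pyRange (a + 100) b 100 := by
  rw [PySem.List.pyRange_of_pos a b (by norm_num),
      PySem.List.pyRange_of_pos (a + 100) b (by norm_num)]
  by_cases hc : a + 100 < b
  · have hnn : 0 ≤ (b - a - 1) / 100 := Int.ediv_nonneg (by omega) (by norm_num)
    have hdiv : (b - a + 100 - 1) / 100 = (b - a - 1) / 100 + 1 := by
      rw [show b - a + 100 - 1 = (b - a - 1) + 1 * 100 by ring,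
          Int.add_mul_ediv_right _ _ (by norm_num : (100:ℤ) ≠ 0)]
    have hdiv' : b - (a + 100) + 100 - 1 = b - a - 1 := by ring
    rw [if_pos h, if_pos hc, hdiv, hdiv']
    rw [show ((b - a - 1) / 100 + 1).toNat = ((b - a - 1) / 100).toNat + 1 by omega]
    rw [List.range_succ_eq_map]
    simp only [List.map_cons, List.map_map]
    congr 1
    · push_cast; ring
    · apply List.map_congr_left
      intro k _
      simp only [Function.comp, Nat.succ_eq_add_one]
      push_cast; ring
  · have h1 : (1:ℤ) ≤ (b - a + 100 - 1) / 100 :=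
      (Int.le_ediv_iff_mul_le (by norm_num)).2 (by omega)
    have h2 : (b - a + 100 - 1) / 100 < 2 :=
      (Int.ediv_lt_iff_lt_mul (by norm_num)).2 (by omega)
    have hq : (b - a + 100 - 1) / 100 = 1 := by omega
    rw [if_pos h, if_neg hc, hq]
    simp

-- B's slice comprehension computes 100-chunks of the suffix from i
lemma sliceMap_eq_chunks (l : List String) :
    ∀ (i : Nat),
      (PySem.List.pyRange (i : Int) (l.length : Int) 100).map
          (fun j => PySem.List.slice l (some j) (some (j + 100)))
        = pvChunk100 (l.drop i) := by
  intro i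
  by_cases hlt : i < l.length
  · rw [pyRange100_cons _ _ (by exact_mod_cast hlt)]
    have hdrop_ne : l.drop i ≠ [] := by
      intro hnil
      have := List.length_drop (l := l) (i := i)
      rw [hnil] at this
      simp at this; omega
    rw [List.map_cons]
    have hslice : PySem.List.slice l (some (i : Int)) (some ((i : Int) + 100))
        = (l.drop i).take 100 := by
      have := PySem.List.slice_natCast_add l i 100
      simpa using this
    have htail : ((i : Int) + 100) = ((i + 100 : Nat) : Int) := by push_cast; ring
    rw [hslice, htail, sliceMap_eq_chunks l (i + 100)]
    conv_rhs => rw [pvChunk100]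
    rw [dif_neg hdrop_ne]
    congr 1
    rw [List.drop_drop]
  · rw [pyRange100_nil _ _ (by exact_mod_cast (not_lt.mp hlt))]
    rw [List.drop_eq_nil_of_le (not_lt.mp hlt)]
    simp [pvChunk100]
termination_by i => l.length - i
decreasing_by omega

-- ===== VERDICT (by name: the statement is the Claim_ definition above) =====
theorem prepare_urls_for_submission_spec : Claim_equal_prepare_urls_for_submission := by
  intro urls submitted _
  unfold Spec_prepare_urls_for_submission prepare_urls_for_submission prepare_urls_for_submission_alt
  have hA : (if (urls.foldl (pvStepA submitted) ([], [])).2.isEmpty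
              then (urls.foldl (pvStepA submitted) ([], [])).1
              else (urls.foldl (pvStepA submitted) ([], [])).1
                   ++ [(urls.foldl (pvStepA submitted) ([], [])).2])
      = pvFinish (urls.foldl (pvStepA submitted) ([], [])) := rfl
  simp only []
  rw [hA, foldA_eq_foldF submitted urls [] [] (by norm_num),
      foldF_eq_chunks _ [] [] (by norm_num)]
  have := sliceMap_eq_chunks (urls.filter (fun url => decide (url ∉ submitted))) 0
  simpa using this.symm
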